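-- pv_equiv track=rewrite | github.com/TomSadeh/clean-room-agent | src/clean_room_agent/execute/decomposed_plan.py | _union_find_groups
-- ===== SOURCE A (Python) =====
-- def _union_find_groups(pairs: list[tuple[int, int]]) -> dict[int, list[int]]:
--     """Union-find grouping from pairwise yes verdicts.
--
--     Args:
--         pairs: list of (index_a, index_b) pairs that should be grouped.
--
--     Returns:
--         dict mapping root index -> list of member indices (sorted).
--     """
--     parent: dict[int, int] = {}
--
--     def find(x: int) -> int:
--         while parent.get(x, x) != x:
--             parent[x] = parent.get(parent[x], parent[x])  # path compression
--             x = parent[x]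
--         return x
--
--     def union(x: int, y: int) -> None:
--         rx, ry = find(x), find(y)
--         if rx != ry:
--             if rx > ry:
--                 rx, ry = ry, rx  # determinism: smaller root wins
--             parent[ry] = rx
--
--     for a, b in pairs:
--         parent.setdefault(a, a)
--         parent.setdefault(b, b)
--         union(a, b)
--
--     groups: dict[int, list[int]] = {}
--     for idx in parent:
--         root = find(idx)
--         groups.setdefault(root, []).append(idx)
--
--     # Sort members within each group for determinism
--     for root in groups:
--         groups[root].sort()
--
--     return groups
-- ===== SOURCE B (Python) =====
-- def _union_find_groups(pairs: list[tuple[int, int]]) -> dict[int, list[int]]: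
--     """Label-propagation grouping: each node carries the minimum index of its
--     component; merging two components relabels the larger-labelled one."""
--     label: dict[int, int] = {}
--     for a, b in pairs:
--         la = label.setdefault(a, a)
--         lb = label.setdefault(b, b)
--         if la != lb:
--             m, o = (la, lb) if la < lb else (lb, la)
--             label = {k: (m if v == o else v) for k, v in label.items()}
--     groups: dict[int, list[int]] = {}
--     for k, v in label.items():
--         groups.setdefault(v, []).append(k)
--     return {r: sorted(ms) for r, ms in groups.items()}
-- ===== Notes on version B (the rewrite author's own statement) =====
-- stated objective: simpler
-- what changed: Replaces the union-find forest (parent pointers, find loops with path compression, root merging) by eager label propagation: every node carries the minimum index of its component and a merge relabels the absorbed component in one dict comprehension; grouping then just reads the stored labels instead of running find again.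
import Mathlib
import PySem

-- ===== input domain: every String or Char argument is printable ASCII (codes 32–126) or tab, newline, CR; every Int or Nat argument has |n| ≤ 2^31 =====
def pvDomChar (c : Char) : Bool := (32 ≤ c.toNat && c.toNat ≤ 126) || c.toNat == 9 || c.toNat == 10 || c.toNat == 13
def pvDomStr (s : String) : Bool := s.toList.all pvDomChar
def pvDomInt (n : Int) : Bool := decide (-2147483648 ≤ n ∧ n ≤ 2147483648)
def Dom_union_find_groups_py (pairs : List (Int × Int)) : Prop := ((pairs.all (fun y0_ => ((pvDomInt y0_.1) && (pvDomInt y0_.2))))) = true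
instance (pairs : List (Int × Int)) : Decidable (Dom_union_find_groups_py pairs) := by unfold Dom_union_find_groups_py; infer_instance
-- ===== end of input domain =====

-- B replaces the union-find forest of A by eager label propagation (each node stores its component's
-- minimum; merges relabel in one pass) — a simpler algorithm with the same return value.


-- ===== PORT A =====
-- `find` with path compression; the fuel (passed as d.size + 1 at each call site) only makes the
-- Python `while` total — it is always sufficient since parent pointers strictly decrease.
def pvFindA : Nat → PySem.Dict Int Int → Int → PySem.Dict Int Int × Int
  | 0, d, x => (d, x)
  | Nat.succ f, d, x =>
    if d.getD x x ≠ x then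
      let p := d.getD x x
      let g := d.getD p p
      pvFindA f (d.insert x g) g
    else (d, x)

def pvUnionA (d : PySem.Dict Int Int) (x y : Int) : PySem.Dict Int Int :=
  let r1 := pvFindA (d.size + 1) d x
  let r2 := pvFindA (r1.1.size + 1) r1.1 y
  if r2.2 ≠ r1.2 then  -- rx ≠ ry
    if r2.2 < r1.2 then r2.1.insert r1.2 r2.2 else r2.1.insert r2.2 r1.2
  else r2.1

def union_find_groups_py (pairs : List (Int × Int)) : List (Int × List Int) :=
  let parent := pairs.foldl (fun d ab =>
      pvUnionA ((d.setdefault ab.1 ab.1).setdefault ab.2 ab.2) ab.1 ab.2) PySem.Dict.empty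
  let st := parent.keys.foldl
      (fun (st : PySem.Dict Int Int × PySem.Dict Int (List Int)) idx =>
        let fr := pvFindA (st.1.size + 1) st.1 idx
        (fr.1, st.2.insert fr.2 (st.2.getD fr.2 [] ++ [idx])))
      (parent, PySem.Dict.empty)
  st.2.items.map (fun p => (p.1, PySem.List.sorted p.2 (fun x => x)))

-- ===== PORT B =====
def union_find_groups_py_alt (pairs : List (Int × Int)) : List (Int × List Int) :=
  let label := pairs.foldl (fun (lab : PySem.Dict Int Int) ab =>
      let lab1 := lab.setdefault ab.1 ab.1
      let la := lab1.getD ab.1 ab.1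
      let lab2 := lab1.setdefault ab.2 ab.2
      let lb := lab2.getD ab.2 ab.2
      if la ≠ lb then
        let m := if la < lb then la else lb
        let o := if la < lb then lb else la
        PySem.Dict.mk (lab2.items.map (fun p => (p.1, if p.2 = o then m else p.2)))
      else lab2) PySem.Dict.empty
  let groups := label.items.foldl
      (fun (g : PySem.Dict Int (List Int)) p => g.insert p.2 (g.getD p.2 [] ++ [p.1]))
      PySem.Dict.empty
  groups.items.map (fun p => (p.1, PySem.List.sorted p.2 (fun x => x)))

-- ===== PRECONDITION & SPEC =====
def Spec_union_find_groups_py (pairs : List (Int × Int)) (out : List (Int × List Int)) : Prop := out = union_find_groups_py_alt pairs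
instance (pairs : List (Int × Int)) (out : List (Int × List Int)) : Decidable (Spec_union_find_groups_py pairs out) := by unfold Spec_union_find_groups_py; infer_instance

-- ===== CLAIM (what is proved, stated in full; the proofs are below) =====
def Claim_equal_union_find_groups_py : Prop := ∀ (pairs : List (Int × Int)), Dom_union_find_groups_py pairs → Spec_union_find_groups_py pairs (union_find_groups_py pairs)

-- ===== LEMMAS AND PROOFS =====

-- The forest invariant of A's parent dict: keys are unique, every stored parent is ≤ its key and
-- is itself a key.
def pvInv (d : PySem.Dict Int Int) : Prop :=
  d.keys.Nodup ∧ ∀ p ∈ d.items, p.2 ≤ p.1 ∧ p.2 ∈ d.keys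

-- Measure: number of keys strictly below x (parent chains strictly decrease through keys).
def pvS (d : PySem.Dict Int Int) (x : Int) : Nat := (d.keys.filter (fun k => decide (k < x))).length

-- Abstract root function (fuel pvS d x + 1 is enough under pvInv).
def pvRootGo : Nat → PySem.Dict Int Int → Int → Int
  | 0, _, x => x
  | Nat.succ f, d, x => if d.getD x x = x then x else pvRootGo f d (d.getD x x)

def pvRoot (d : PySem.Dict Int Int) (x : Int) : Int := pvRootGo (pvS d x + 1) d x

lemma pvStep (d : PySem.Dict Int Int) (x : Int) (hInv : pvInv d)
    (h : d.getD x x ≠ x) :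
    d.getD x x < x ∧ d.getD x x ∈ d.keys ∧ x ∈ d.keys := by
  rcases hv : d.get? x with _ | v
  · simp [PySem.Dict.getD, hv] at h
  · have hm := PySem.Dict.mem_items_of_get?_eq_some d hv
    have h2 := hInv.2 _ hm
    have hgd : d.getD x x = v := by simp [PySem.Dict.getD, hv]
    refine ⟨?_, ?_, PySem.Dict.mem_keys_of_mem_items d hm⟩
    · rw [hgd] at h ⊢; omega
    · rw [hgd]; exact h2.2

lemma pvS_lt (d : PySem.Dict Int Int) (x : Int) (hInv : pvInv d)
    (h : d.getD x x ≠ x) : pvS d (d.getD x x) < pvS d x := by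
  obtain ⟨hlt, hmem, -⟩ := pvStep d x hInv h
  set p := d.getD x x with hp
  unfold pvS
  have hsub : d.keys.filter (fun k => decide (k < p))
      = (d.keys.filter (fun k => decide (k < x))).filter (fun k => decide (k < p)) := by
    rw [List.filter_filter]
    apply List.filter_congr
    intro k hk
    by_cases hkp : k < p
    · simp [hkp, lt_trans hkp hlt]
    · simp [hkp]
  rw [hsub]
  apply List.length_filter_lt_length_iff_exists.mpr
  exact ⟨p, by simp [List.mem_filter, hmem, hlt], by simp⟩

lemma pvS_mono (d : PySem.Dict Int Int) {a b : Int} (hab : a ≤ b) : pvS d a ≤ pvS d b := by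
  unfold pvS
  have hsub : d.keys.filter (fun k => decide (k < a))
      = (d.keys.filter (fun k => decide (k < b))).filter (fun k => decide (k < a)) := by
    rw [List.filter_filter]
    apply List.filter_congr
    intro k hk
    by_cases hka : k < a
    · simp [hka, lt_of_lt_of_le hka hab]
    · simp [hka]
  rw [hsub]
  exact List.length_filter_le _ _

lemma pvS_le_size (d : PySem.Dict Int Int) (x : Int) : pvS d x ≤ d.size := by
  calc pvS d x ≤ d.keys.length := List.length_filter_le _ _
  _ = d.size := by simp [PySem.Dict.keys, PySem.Dict.size]

lemma pvRootGo_congr (d : PySem.Dict Int Int) (hInv : pvInv d) :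
    ∀ n x f f', pvS d x ≤ n → pvS d x < f → pvS d x < f' →
      pvRootGo f d x = pvRootGo f' d x := by
  intro n
  induction n with
  | zero =>
    intro x f f' hn hf hf'
    obtain ⟨f, rfl⟩ := Nat.exists_eq_succ_of_ne_zero (by omega : f ≠ 0)
    obtain ⟨f', rfl⟩ := Nat.exists_eq_succ_of_ne_zero (by omega : f' ≠ 0)
    simp only [pvRootGo]
    split
    · rfl
    · exact absurd (pvS_lt d x hInv (by assumption)) (by omega)
  | succ n ih =>
    intro x f f' hn hf hf'
    obtain ⟨f, rfl⟩ := Nat.exists_eq_succ_of_ne_zero (by omega : f ≠ 0)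
    obtain ⟨f', rfl⟩ := Nat.exists_eq_succ_of_ne_zero (by omega : f' ≠ 0)
    simp only [pvRootGo]
    split
    · rfl
    · have hlt := pvS_lt d x hInv (by assumption)
      exact ih _ f f' (by omega) (by omega) (by omega)

lemma pvRoot_unfold (d : PySem.Dict Int Int) (x : Int) (hInv : pvInv d) :
    pvRoot d x = if d.getD x x = x then x else pvRoot d (d.getD x x) := by
  unfold pvRoot
  conv_lhs => rw [pvRootGo]
  split
  · rfl
  · have hlt := pvS_lt d x hInv (by assumption)
    exact pvRootGo_congr d hInv (pvS d x) _ _ _ (by omega) (by omega) (by omega)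

lemma pvRoot_of_fix (d : PySem.Dict Int Int) (x : Int) (h : d.getD x x = x) :
    pvRoot d x = x := by simp [pvRoot, pvRootGo, h]

lemma pvRoot_fix (d : PySem.Dict Int Int) (x : Int) (hInv : pvInv d) :
    d.getD (pvRoot d x) (pvRoot d x) = pvRoot d x := by
  suffices h : ∀ n x, pvS d x ≤ n → d.getD (pvRoot d x) (pvRoot d x) = pvRoot d x from
    h (pvS d x) x (le_refl _)
  intro n
  induction n with
  | zero =>
    intro x hn
    by_cases h : d.getD x x = x
    · rw [pvRoot_of_fix d x h]; exact h
    · exact absurd (pvS_lt d x hInv h) (by omega)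
  | succ n ih =>
    intro x hn
    by_cases h : d.getD x x = x
    · rw [pvRoot_of_fix d x h]; exact h
    · rw [pvRoot_unfold d x hInv]
      simp only [h, if_false]
      have := pvS_lt d x hInv h
      exact ih _ (by omega)

lemma pvRoot_mem (d : PySem.Dict Int Int) (x : Int) (hInv : pvInv d) (hx : x ∈ d.keys) :
    pvRoot d x ∈ d.keys := by
  suffices h : ∀ n x, pvS d x ≤ n → x ∈ d.keys → pvRoot d x ∈ d.keys from
    h (pvS d x) x (le_refl _) hx
  intro n
  induction n with
  | zero =>
    intro x hn hx
    by_cases h : d.getD x x = x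
    · rw [pvRoot_of_fix d x h]; exact hx
    · exact absurd (pvS_lt d x hInv h) (by omega)
  | succ n ih =>
    intro x hn hx
    by_cases h : d.getD x x = x
    · rw [pvRoot_of_fix d x h]; exact hx
    · rw [pvRoot_unfold d x hInv]
      simp only [h, if_false]
      obtain ⟨-, hm, -⟩ := pvStep d x hInv h
      have := pvS_lt d x hInv h
      exact ih _ (by omega) hm

-- keys determine pvS
lemma pvS_keys_eq {d d' : PySem.Dict Int Int} (h : d'.keys = d.keys) (x : Int) :
    pvS d' x = pvS d x := by unfold pvS; rw [h]

-- inserting (x ↦ v) for an existing key x with v ≤ x, v a key, keeps the invariant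
lemma pvInv_insert (d : PySem.Dict Int Int) (x v : Int) (hInv : pvInv d)
    (hx : x ∈ d.keys) (hv1 : v ≤ x) (hv2 : v ∈ d.keys) :
    (d.insert x v).keys = d.keys ∧ pvInv (d.insert x v) := by
  have hc : d.contains x = true := (PySem.Dict.contains_iff_mem_keys d x).mpr hx
  have hkeys : (d.insert x v).keys = d.keys := PySem.Dict.keys_insert_of_contains d v hc
  refine ⟨hkeys, ⟨by rw [hkeys]; exact hInv.1, ?_⟩⟩
  intro p hp
  rw [PySem.Dict.items_insert_of_contains d v hc] at hp
  rw [hkeys]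
  obtain ⟨q, hq, rfl⟩ := List.mem_map.mp hp
  by_cases hqx : q.1 = x
  · simp only [hqx, beq_self_eq_true, if_true]
    exact ⟨hv1, hv2⟩
  · simp only [beq_iff_eq, hqx, if_false]
    exact hInv.2 q hq

-- path compression preserves everything
lemma pvCompress (d : PySem.Dict Int Int) (x : Int) (hInv : pvInv d)
    (h : d.getD x x ≠ x) :
    let g := d.getD (d.getD x x) (d.getD x x)
    let d' := d.insert x g
    d'.keys = d.keys ∧ pvInv d' ∧ (∀ k, pvRoot d' k = pvRoot d k) := by
  intro g d'
  obtain ⟨hpx, hpk, hxk⟩ := pvStep d x hInv h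
  set p := d.getD x x with hp
  have hgp : g ≤ p ∧ g ∈ d.keys := by
    by_cases hfix : d.getD p p = p
    · exact ⟨le_of_eq hfix, by rw [show g = p from hfix]; exact hpk⟩
    · obtain ⟨h1, h2, -⟩ := pvStep d p hInv hfix
      exact ⟨le_of_lt h1, h2⟩
  obtain ⟨hkeys, hInv'⟩ := pvInv_insert d x g hInv hxk (le_trans hgp.1 (le_of_lt hpx)) hgp.2
  refine ⟨hkeys, hInv', ?_⟩
  have hgx : g ≠ x := by omega
  have hgetd' : ∀ k, k ≠ x → d'.getD k k = d.getD k k := by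
    intro k hk
    show (d.insert x g).getD k k = d.getD k k
    rw [PySem.Dict.getD_insert]
    simp [hk]
  have hgetx : d'.getD x x = g := by
    show (d.insert x g).getD x x = g
    rw [PySem.Dict.getD_insert]; simp
  have hS : ∀ k, pvS d' k = pvS d k := pvS_keys_eq hkeys
  -- pvRoot d p = pvRoot d g
  have hpg : pvRoot d p = pvRoot d g := by
    by_cases hfix : d.getD p p = p
    · rw [show g = p from hfix]
    · rw [pvRoot_unfold d p hInv]
      simp only [hfix, if_false]
      rfl
  suffices hall : ∀ n k, pvS d' k ≤ n → pvRoot d' k = pvRoot d k by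
    intro k; exact hall (pvS d' k) k (le_refl _)
  intro n
  induction n with
  | zero =>
    intro k hn
    by_cases hk : k = x
    · rw [hk] at hn ⊢
      exfalso
      have : pvS d' x ≠ 0 := by
        have := pvS_lt d' x hInv' (by rw [hgetx]; omega)
        omega
      omega
    · by_cases hq : d.getD k k = k
      · rw [pvRoot_of_fix d' k (by rw [hgetd' k hk]; exact hq), pvRoot_of_fix d k hq]
      · exfalso
        have := pvS_lt d' k hInv' (by rw [hgetd' k hk]; exact hq)
        omega
  | succ n ih =>
    intro k hn
    by_cases hk : k = x
    · rw [hk] at hn ⊢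
      rw [pvRoot_unfold d' x hInv', hgetx]
      simp only [hgx, if_false]
      have hs1 : pvS d g < pvS d x :=
        lt_of_le_of_lt (pvS_mono d hgp.1) (pvS_lt d x hInv h)
      rw [ih g (by rw [hS]; rw [hS] at hn; omega)]
      rw [pvRoot_unfold d x hInv]
      simp only [← hp, show p ≠ x by omega, if_false]
      exact hpg.symm
    · by_cases hq : d.getD k k = k
      · rw [pvRoot_of_fix d' k (by rw [hgetd' k hk]; exact hq), pvRoot_of_fix d k hq]
      · rw [pvRoot_unfold d' k hInv', pvRoot_unfold d k hInv, hgetd' k hk]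
        simp only [hq, if_false]
        have := pvS_lt d k hInv hq
        exact ih _ (by rw [hS]; rw [hS] at hn; omega)

-- uniting: inserting (o ↦ m) for two roots m < o
lemma pvUnite (d : PySem.Dict Int Int) (m o : Int) (hInv : pvInv d)
    (hm : d.getD m m = m) (hmk : m ∈ d.keys) (ho : d.getD o o = o) (hok : o ∈ d.keys)
    (hlt : m < o) :
    let d' := d.insert o m
    d'.keys = d.keys ∧ pvInv d' ∧
      (∀ k, pvRoot d' k = if pvRoot d k = o then m else pvRoot d k) := by
  intro d'
  obtain ⟨hkeys, hInv'⟩ := pvInv_insert d o m hInv hok (le_of_lt hlt) hmk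
  refine ⟨hkeys, hInv', ?_⟩
  have hmo : m ≠ o := by omega
  have hgetd' : ∀ k, k ≠ o → d'.getD k k = d.getD k k := by
    intro k hk
    show (d.insert o m).getD k k = d.getD k k
    rw [PySem.Dict.getD_insert]; simp [hk]
  have hgeto : d'.getD o o = m := by
    show (d.insert o m).getD o o = m
    rw [PySem.Dict.getD_insert]; simp
  have hS : ∀ k, pvS d' k = pvS d k := pvS_keys_eq hkeys
  -- the root o case, directly
  have hro : pvRoot d' o = m := by
    rw [pvRoot_unfold d' o hInv', hgeto]
    simp only [hmo, if_false]
    exact pvRoot_of_fix d' m (by rw [hgetd' m hmo]; exact hm)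
  suffices hall : ∀ n k, pvS d' k ≤ n →
      pvRoot d' k = if pvRoot d k = o then m else pvRoot d k by
    intro k; exact hall (pvS d' k) k (le_refl _)
  intro n
  induction n with
  | zero =>
    intro k hn
    by_cases hk : k = o
    · rw [hk, hro, pvRoot_of_fix d o ho]; simp
    · by_cases hq : d.getD k k = k
      · rw [pvRoot_of_fix d' k (by rw [hgetd' k hk]; exact hq), pvRoot_of_fix d k hq]
        simp [hk]
      · exfalso
        have := pvS_lt d' k hInv' (by rw [hgetd' k hk]; exact hq)
        omega
  | succ n ih =>
    intro k hn
    by_cases hk : k = o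
    · rw [hk, hro, pvRoot_of_fix d o ho]; simp
    · by_cases hq : d.getD k k = k
      · rw [pvRoot_of_fix d' k (by rw [hgetd' k hk]; exact hq), pvRoot_of_fix d k hq]
        simp [hk]
      · rw [pvRoot_unfold d' k hInv', pvRoot_unfold d k hInv, hgetd' k hk]
        simp only [hq, if_false]
        have := pvS_lt d k hInv hq
        exact ih _ (by rw [hS]; rw [hS] at hn; omega)

-- setdefault with a fresh key
lemma pvSetdefault (d : PySem.Dict Int Int) (a : Int) (hInv : pvInv d) :
    let d' := d.setdefault a a
    pvInv d' ∧ (∀ k, pvRoot d' k = pvRoot d k) ∧ a ∈ d'.keys ∧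
      d'.keys = (if a ∈ d.keys then d.keys else d.keys ++ [a]) := by
  intro d'
  by_cases ha : a ∈ d.keys
  · have hc : d.contains a = true := (PySem.Dict.contains_iff_mem_keys d a).mpr ha
    have hd : d' = d := PySem.Dict.setdefault_of_contains d a hc
    rw [hd]
    exact ⟨hInv, fun _ => rfl, ha, by simp [ha]⟩
  · have hc : d.contains a = false := by
      rcases h : d.contains a with _ | _
      · rfl
      · exact absurd ((PySem.Dict.contains_iff_mem_keys d a).mp h) ha
    have hd : d' = d.insert a a := PySem.Dict.setdefault_of_not_contains d a hc
    have hkeys : d'.keys = d.keys ++ [a] := by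
      rw [hd]; exact PySem.Dict.keys_insert_of_not_contains d a hc
    have hitems : d'.items = d.items ++ [(a, a)] := by
      rw [hd]; exact PySem.Dict.items_insert_of_not_contains d a hc
    have hInv' : pvInv d' := by
      constructor
      · rw [hkeys]
        simp only [List.nodup_append, List.nodup_singleton]
        exact ⟨hInv.1, trivial, fun y hy b hb hyb => ha ((List.mem_singleton.mp hb ▸ hyb) ▸ hy)⟩
      · intro p hp
        rw [hitems] at hp
        rw [hkeys]
        rcases List.mem_append.mp hp with hp | hp
        · obtain ⟨h1, h2⟩ := hInv.2 p hp
          exact ⟨h1, List.mem_append.mpr (Or.inl h2)⟩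
        · simp only [List.mem_singleton] at hp
          rw [hp]
          exact ⟨le_refl _, by simp⟩
    have hgetd' : ∀ k, k ≠ a → d'.getD k k = d.getD k k := by
      intro k hk
      rw [hd]
      show (d.insert a a).getD k k = d.getD k k
      rw [PySem.Dict.getD_insert]; simp [hk]
    have hgeta : d'.getD a a = a := by
      rw [hd]
      show (d.insert a a).getD a a = a
      rw [PySem.Dict.getD_insert]; simp
    have hroots : ∀ k, pvRoot d' k = pvRoot d k := by
      suffices hall : ∀ n k, pvS d' k ≤ n → pvRoot d' k = pvRoot d k by
        intro k; exact hall (pvS d' k) k (le_refl _)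
      intro n
      induction n with
      | zero =>
        intro k hn
        by_cases hk : k = a
        · rw [hk, pvRoot_of_fix d' a hgeta, pvRoot_of_fix d a
            (PySem.Dict.getD_of_not_contains d a hc)]
        · by_cases hq : d.getD k k = k
          · rw [pvRoot_of_fix d' k (by rw [hgetd' k hk]; exact hq), pvRoot_of_fix d k hq]
          · exfalso
            have := pvS_lt d' k hInv' (by rw [hgetd' k hk]; exact hq)
            omega
      | succ n ih =>
        intro k hn
        by_cases hk : k = a
        · rw [hk, pvRoot_of_fix d' a hgeta, pvRoot_of_fix d a
            (PySem.Dict.getD_of_not_contains d a hc)]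
        · by_cases hq : d.getD k k = k
          · rw [pvRoot_of_fix d' k (by rw [hgetd' k hk]; exact hq), pvRoot_of_fix d k hq]
          · rw [pvRoot_unfold d' k hInv', pvRoot_unfold d k hInv, hgetd' k hk]
            simp only [hq, if_false]
            have h2 := pvS_lt d' k hInv' (by rw [hgetd' k hk]; exact hq)
            rw [hgetd' k hk] at h2
            exact ih _ (by omega)
    exact ⟨hInv', hroots, by rw [hkeys]; simp, by simp [ha, hkeys]⟩

-- find is faithful to the abstract root
lemma pvFindA_spec (f : Nat) :
    ∀ (d : PySem.Dict Int Int) (x : Int), pvInv d → pvS d x < f →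
      (pvFindA f d x).1.keys = d.keys ∧ pvInv (pvFindA f d x).1 ∧
        (∀ k, pvRoot (pvFindA f d x).1 k = pvRoot d k) ∧
        (pvFindA f d x).2 = pvRoot d x := by
  induction f with
  | zero =>
    intro d x hInv hf
    exact absurd hf (by omega)
  | succ f ih =>
    intro d x hInv hf
    by_cases h : d.getD x x = x
    · have hstop : pvFindA (f + 1) d x = (d, x) := by
        simp only [pvFindA]
        rw [if_neg (by simpa using h)]
      rw [hstop]
      exact ⟨rfl, hInv, fun k => rfl, (pvRoot_of_fix d x h).symm⟩
    · have hgp : d.getD (d.getD x x) (d.getD x x) ≤ d.getD x x := by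
        by_cases hfix : d.getD (d.getD x x) (d.getD x x) = d.getD x x
        · exact le_of_eq hfix
        · exact le_of_lt (pvStep d (d.getD x x) hInv hfix).1
      have hstep : pvFindA (f + 1) d x
          = pvFindA f (d.insert x (d.getD (d.getD x x) (d.getD x x)))
              (d.getD (d.getD x x) (d.getD x x)) := by
        simp only [pvFindA]
        rw [if_pos (by simpa using h)]
      obtain ⟨hkeys, hInv', hroots⟩ := pvCompress d x hInv h
      have hSg : pvS (d.insert x (d.getD (d.getD x x) (d.getD x x)))
          (d.getD (d.getD x x) (d.getD x x)) < f := by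
        have h1 := pvS_mono d hgp
        have h2 := pvS_lt d x hInv h
        have h3 := pvS_keys_eq hkeys (d.getD (d.getD x x) (d.getD x x))
        omega
      obtain ⟨k1, k2, k3, k4⟩ := ih _ _ hInv' hSg
      rw [hstep]
      refine ⟨by rw [k1, hkeys], k2, fun k => by rw [k3 k, hroots k], ?_⟩
      rw [k4, hroots _]
      rw [pvRoot_unfold d x hInv, if_neg h]
      by_cases hfix : d.getD (d.getD x x) (d.getD x x) = d.getD x x
      · rw [hfix]
      · rw [pvRoot_unfold d (d.getD x x) hInv, if_neg hfix]

-- simulation invariant between A's parent dict and B's label dict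
def pvSim (d lab : PySem.Dict Int Int) : Prop :=
  pvInv d ∧ lab.keys = d.keys ∧ ∀ k ∈ d.keys, lab.get? k = some (pvRoot d k)

lemma pvGetMapVal (f : Int → Int) (l : List (Int × Int)) (k : Int) :
    (PySem.Dict.mk (l.map (fun p => (p.1, f p.2)))).get? k
      = ((PySem.Dict.mk l).get? k).map f := by
  induction l with
  | nil => rfl
  | cons p t ih =>
    rw [show (p :: t).map (fun p => (p.1, f p.2))
        = (p.1, f p.2) :: t.map (fun p => (p.1, f p.2)) from rfl]
    rw [PySem.Dict.get?_mk_cons, PySem.Dict.get?_mk_cons]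
    split
    · rfl
    · exact ih

lemma pvKeysMapVal (f : Int → Int) (l : List (Int × Int)) :
    (PySem.Dict.mk (l.map (fun p => (p.1, f p.2)))).keys = (PySem.Dict.mk l).keys := by
  simp [PySem.Dict.keys]

lemma pvSim_setdefault (d lab : PySem.Dict Int Int) (a : Int) (h : pvSim d lab) :
    pvSim (d.setdefault a a) (lab.setdefault a a) := by
  obtain ⟨hInv, hK, hG⟩ := h
  obtain ⟨hInv', hroots, hmem, hkeys⟩ := pvSetdefault d a hInv
  by_cases ha : a ∈ d.keys
  · have hd : d.setdefault a a = d :=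
      PySem.Dict.setdefault_of_contains d a ((PySem.Dict.contains_iff_mem_keys d a).mpr ha)
    have hl : lab.setdefault a a = lab :=
      PySem.Dict.setdefault_of_contains lab a
        ((PySem.Dict.contains_iff_mem_keys lab a).mpr (by rw [hK]; exact ha))
    rw [hd, hl]
    exact ⟨hInv, hK, hG⟩
  · have hca : d.contains a = false := by
      rcases hcc : d.contains a with _ | _
      · rfl
      · exact absurd ((PySem.Dict.contains_iff_mem_keys d a).mp hcc) ha
    have hcal : lab.contains a = false := by
      rcases hcc : lab.contains a with _ | _
      · rfl
      · exact absurd ((PySem.Dict.contains_iff_mem_keys lab a).mp hcc) (by rw [hK]; exact ha)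
    have hl : lab.setdefault a a = lab.insert a a :=
      PySem.Dict.setdefault_of_not_contains lab a hcal
    refine ⟨hInv', ?_, ?_⟩
    · rw [hl, PySem.Dict.keys_insert_of_not_contains lab a hcal, hkeys, hK]
      simp [ha]
    · intro k hk
      rw [hkeys] at hk
      simp only [ha, if_false] at hk
      rw [hroots k, hl]
      rcases List.mem_append.mp hk with hk | hk
      · have hka : k ≠ a := fun hh => ha (hh ▸ hk)
        rw [PySem.Dict.get?_insert_of_ne lab a hka]
        exact hG k hk
      · simp only [List.mem_singleton] at hk
        rw [hk, PySem.Dict.get?_insert_self]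
        have : pvRoot d a = a :=
          pvRoot_of_fix d a (PySem.Dict.getD_of_not_contains d a hca)
        rw [this]

lemma pvSim_step (d lab : PySem.Dict Int Int) (ab : Int × Int) (h : pvSim d lab) :
    pvSim (pvUnionA ((d.setdefault ab.1 ab.1).setdefault ab.2 ab.2) ab.1 ab.2)
      (let lab1 := lab.setdefault ab.1 ab.1
       let la := lab1.getD ab.1 ab.1
       let lab2 := lab1.setdefault ab.2 ab.2
       let lb := lab2.getD ab.2 ab.2
       if la ≠ lb then
         let m := if la < lb then la else lb
         let o := if la < lb then lb else la
         PySem.Dict.mk (lab2.items.map (fun p => (p.1, if p.2 = o then m else p.2)))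
       else lab2) := by
  have h1 := pvSim_setdefault d lab ab.1 h
  have h2 := pvSim_setdefault _ _ ab.2 h1
  obtain ⟨hInv2, hK2, hG2⟩ := h2
  obtain ⟨hInv1, -, hmem1, -⟩ := pvSetdefault d ab.1 h.1
  obtain ⟨-, hroots21, hmem2, hkeys21⟩ := pvSetdefault (d.setdefault ab.1 ab.1) ab.2 hInv1
  -- abbreviations (proof-local)
  set d2 := (d.setdefault ab.1 ab.1).setdefault ab.2 ab.2 with hd2
  set lab1 := lab.setdefault ab.1 ab.1 with hlab1
  set lab2 := lab1.setdefault ab.2 ab.2 with hlab2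
  have ha2 : ab.1 ∈ d2.keys := by
    rw [hkeys21]
    split
    · exact hmem1
    · exact List.mem_append.mpr (Or.inl hmem1)
  have hb2 : ab.2 ∈ d2.keys := hmem2
  -- the two stored labels are the current roots
  have h1G : ∀ k ∈ (d.setdefault ab.1 ab.1).keys, lab1.get? k = some (pvRoot (d.setdefault ab.1 ab.1) k) := h1.2.2
  have hla : lab1.getD ab.1 ab.1 = pvRoot d2 ab.1 := by
    rw [PySem.Dict.getD_eq_get?_getD, h1G ab.1 hmem1, hroots21 ab.1]
    rfl
  have hlb : lab2.getD ab.2 ab.2 = pvRoot d2 ab.2 := by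
    rw [PySem.Dict.getD_eq_get?_getD, hG2 ab.2 hb2]
    rfl
  -- find specs
  obtain ⟨e1, e2, e3, e4⟩ := pvFindA_spec (d2.size + 1) d2 ab.1 hInv2
    (by have := pvS_le_size d2 ab.1; omega)
  set F1 := pvFindA (d2.size + 1) d2 ab.1 with hF1
  obtain ⟨g1, g2, g3, g4⟩ := pvFindA_spec (F1.1.size + 1) F1.1 ab.2 e2
    (by have := pvS_le_size F1.1 ab.2; omega)
  set F2 := pvFindA (F1.1.size + 1) F1.1 ab.2 with hF2
  have hr1 : F1.2 = pvRoot d2 ab.1 := e4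
  have hr2 : F2.2 = pvRoot d2 ab.2 := by rw [g4, e3]
  have hkF2 : F2.1.keys = d2.keys := by rw [g1, e1]
  have hrootsF2 : ∀ k, pvRoot F2.1 k = pvRoot d2 k := fun k => by rw [g3 k, e3 k]
  have hUnion : pvUnionA d2 ab.1 ab.2
      = if F2.2 ≠ F1.2 then
          (if F2.2 < F1.2 then F2.1.insert F1.2 F2.2 else F2.1.insert F2.2 F1.2)
        else F2.1 := by
    rw [pvUnionA]
  rw [hUnion]
  simp only [← hlab2, hla, hlb, hr1, hr2]
  by_cases heq : pvRoot d2 ab.2 = pvRoot d2 ab.1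
  · rw [if_neg (by omega), if_neg (by omega)]
    exact ⟨g2, by rw [hkF2]; exact hK2, fun k hk => by
      rw [hrootsF2 k, hG2 k (by rw [← hkF2]; exact hk)]⟩
  · rw [if_pos (show pvRoot d2 ab.2 ≠ pvRoot d2 ab.1 by omega), if_pos (show pvRoot d2 ab.1 ≠ pvRoot d2 ab.2 by omega)]
    have hfixa : F2.1.getD (pvRoot d2 ab.1) (pvRoot d2 ab.1) = pvRoot d2 ab.1 := by
      have := pvRoot_fix F2.1 ab.1 g2
      rwa [hrootsF2 ab.1] at this
    have hfixb : F2.1.getD (pvRoot d2 ab.2) (pvRoot d2 ab.2) = pvRoot d2 ab.2 := by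
      have := pvRoot_fix F2.1 ab.2 g2
      rwa [hrootsF2 ab.2] at this
    have hmema : pvRoot d2 ab.1 ∈ F2.1.keys := by
      have := pvRoot_mem F2.1 ab.1 g2 (by rw [hkF2]; exact ha2)
      rwa [hrootsF2 ab.1] at this
    have hmemb : pvRoot d2 ab.2 ∈ F2.1.keys := by
      have := pvRoot_mem F2.1 ab.2 g2 (by rw [hkF2]; exact hb2)
      rwa [hrootsF2 ab.2] at this
    by_cases hlt : pvRoot d2 ab.1 < pvRoot d2 ab.2
    · -- o = root b, m = root a ; A inserts (root b ↦ root a)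
      rw [if_neg (show ¬ (pvRoot d2 ab.2 < pvRoot d2 ab.1) by omega)]
      simp only [if_pos hlt]
      obtain ⟨u1, u2, u3⟩ := pvUnite F2.1 (pvRoot d2 ab.1) (pvRoot d2 ab.2) g2
        hfixa hmema hfixb hmemb hlt
      refine ⟨u2, ?_, ?_⟩
      · rw [pvKeysMapVal (fun v => if v = pvRoot d2 ab.2 then pvRoot d2 ab.1 else v)
          lab2.items, u1, hkF2]
        exact hK2
      · intro k hk
        rw [u1, hkF2] at hk
        rw [pvGetMapVal (fun v => if v = pvRoot d2 ab.2 then pvRoot d2 ab.1 else v)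
          lab2.items k]
        rw [show PySem.Dict.mk lab2.items = lab2 from rfl, hG2 k hk]
        rw [u3 k, hrootsF2 k]
        rfl
    · have hlt' : pvRoot d2 ab.2 < pvRoot d2 ab.1 := by
        rcases lt_or_ge (pvRoot d2 ab.2) (pvRoot d2 ab.1) with hh | hh
        · exact hh
        · exact absurd (le_antisymm (by omega) hh) heq
      rw [if_pos hlt']
      simp only [if_neg hlt]
      obtain ⟨u1, u2, u3⟩ := pvUnite F2.1 (pvRoot d2 ab.2) (pvRoot d2 ab.1) g2
        hfixb hmemb hfixa hmema hlt'
      refine ⟨u2, ?_, ?_⟩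
      · rw [pvKeysMapVal (fun v => if v = pvRoot d2 ab.1 then pvRoot d2 ab.2 else v)
          lab2.items, u1, hkF2]
        exact hK2
      · intro k hk
        rw [u1, hkF2] at hk
        rw [pvGetMapVal (fun v => if v = pvRoot d2 ab.1 then pvRoot d2 ab.2 else v)
          lab2.items k]
        rw [show PySem.Dict.mk lab2.items = lab2 from rfl, hG2 k hk]
        rw [u3 k, hrootsF2 k]
        rfl

lemma pvSim_fold (pairs : List (Int × Int)) :
    ∀ (d lab : PySem.Dict Int Int), pvSim d lab →
    pvSim (pairs.foldl (fun d ab =>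
        pvUnionA ((d.setdefault ab.1 ab.1).setdefault ab.2 ab.2) ab.1 ab.2) d)
      (pairs.foldl (fun (lab : PySem.Dict Int Int) ab =>
        let lab1 := lab.setdefault ab.1 ab.1
        let la := lab1.getD ab.1 ab.1
        let lab2 := lab1.setdefault ab.2 ab.2
        let lb := lab2.getD ab.2 ab.2
        if la ≠ lb then
          let m := if la < lb then la else lb
          let o := if la < lb then lb else la
          PySem.Dict.mk (lab2.items.map (fun p => (p.1, if p.2 = o then m else p.2)))
        else lab2) lab) := by
  induction pairs with
  | nil => exact fun d lab h => h
  | cons ab rest ih =>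
    intro d lab h
    simp only [List.foldl_cons]
    exact ih _ _ (pvSim_step d lab ab h)

-- A's grouping fold computes the same groups as grouping by the abstract root
lemma pvGroupA (dF : PySem.Dict Int Int) :
    ∀ (ks : List Int) (d : PySem.Dict Int Int) (g : PySem.Dict Int (List Int)),
      pvInv d → (∀ k, pvRoot d k = pvRoot dF k) →
      (ks.foldl (fun (st : PySem.Dict Int Int × PySem.Dict Int (List Int)) idx =>
          let fr := pvFindA (st.1.size + 1) st.1 idx
          (fr.1, st.2.insert fr.2 (st.2.getD fr.2 [] ++ [idx]))) (d, g)).2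
      = ks.foldl (fun (g : PySem.Dict Int (List Int)) k =>
          g.insert (pvRoot dF k) (g.getD (pvRoot dF k) [] ++ [k])) g := by
  intro ks
  induction ks with
  | nil => intro d g _ _; rfl
  | cons k ks ih =>
    intro d g hInv hroots
    simp only [List.foldl_cons]
    obtain ⟨e1, e2, e3, e4⟩ := pvFindA_spec (d.size + 1) d k hInv
      (by have := pvS_le_size d k; omega)
    rw [ih (pvFindA (d.size + 1) d k).1 _ e2 (fun j => by rw [e3 j, hroots j])]
    rw [e4, hroots k]

-- ===== VERDICT (by name: the statement is the Claim_ definition above) =====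
theorem union_find_groups_py_spec : Claim_equal_union_find_groups_py := by
  intro pairs _
  unfold Spec_union_find_groups_py union_find_groups_py union_find_groups_py_alt
  dsimp only
  have hsim := pvSim_fold pairs PySem.Dict.empty PySem.Dict.empty
    ⟨⟨by simp [PySem.Dict.keys, PySem.Dict.empty],
      by intro p hp; simp [PySem.Dict.empty] at hp⟩,
     rfl,
     by intro k hk; simp [PySem.Dict.keys, PySem.Dict.empty] at hk⟩
  set dF := pairs.foldl (fun d ab =>
      pvUnionA ((d.setdefault ab.1 ab.1).setdefault ab.2 ab.2) ab.1 ab.2)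
      PySem.Dict.empty with hdF
  set labF := pairs.foldl (fun (lab : PySem.Dict Int Int) ab =>
      let lab1 := lab.setdefault ab.1 ab.1
      let la := lab1.getD ab.1 ab.1
      let lab2 := lab1.setdefault ab.2 ab.2
      let lb := lab2.getD ab.2 ab.2
      if la ≠ lb then
        let m := if la < lb then la else lb
        let o := if la < lb then lb else la
        PySem.Dict.mk (lab2.items.map (fun p => (p.1, if p.2 = o then m else p.2)))
      else lab2) PySem.Dict.empty with hlabF
  obtain ⟨hInvF, hKF, hGF⟩ := hsim
  rw [pvGroupA dF dF.keys dF PySem.Dict.empty hInvF (fun k => rfl)]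
  have hitems : labF.items = dF.keys.map (fun k => (k, pvRoot dF k)) := by
    rw [PySem.Dict.items_eq_map_keys labF (by rw [hKF]; exact hInvF.1) 0, hKF]
    apply List.map_congr_left
    intro k hk
    rw [PySem.Dict.getD_eq_get?_getD, hGF k hk]
    rfl
  rw [hitems, List.foldl_map]
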